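-- pv_equiv track=rewrite | github.com/Sanya1001/fcc-scientific-computing-w-python | arithmetic_arranger.py | arithmetic_arranger
-- ===== SOURCE A (Python) =====
-- def arithmetic_arranger(problems, solve=False):
--   firstOp = []
--   operators = []
--   secondOp = []
--
--   if len(problems)>5:
--     return 'Error: Too many problems.'
--
--   for problem in problems:
--     splitOp = problem.split(' ')
--     firstOp.append(splitOp[0])
--     operators.append(splitOp[1])
--     secondOp.append(splitOp[2])
--
--   for op in operators:
--     if op != '+' and op != '-':
--       return "Error: Operator must be '+' or '-'."
--
--   for number in firstOp:
--     if not number.isdecimal():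
--       return 'Error: Numbers must only contain digits.'
--
--   for number in secondOp:
--     if not number.isdecimal():
--       return 'Error: Numbers must only contain digits.'
--
--   for number in firstOp:
--     if len(number) > 4:
--       return 'Error: Numbers cannot be more than four digits.'
--
--   for number in secondOp:
--     if len(number) > 4:
--       return 'Error: Numbers cannot be more than four digits.'
--
--   first = []
--   second = []
--   third = []
--   fourth = []
--
--   for i in range(len(firstOp)):
--     if len(firstOp[i]) > len(secondOp[i]):
--       first.append(" "*2 + firstOp[i])
--     else:
--       first.append(" "*(len(secondOp[i]) - len(firstOp[i]) + 2) + firstOp[i])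
--
--   for i in range(len(secondOp)):
--     if len(secondOp[i]) > len(firstOp[i]):
--       second.append(operators[i] + " " + secondOp[i])
--     else:
--       second.append(operators[i] + " "*(len(firstOp[i]) - len(secondOp[i]) + 1) + secondOp[i])
--
--   for i in range(len(firstOp)):
--     third.append('-'*(max(len(firstOp[i]), len(secondOp[i]))+2))
--
--   if solve:
--     for i in range(len(firstOp)):
--       if operators[i] == "+":
--           ans = str(int(firstOp[i]) + int(secondOp[i]))
--       else:
--           ans = str(int(firstOp[i]) - int(secondOp[i]))
--
--       if len(ans) > max(len(firstOp[i]), len(secondOp[i])):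
--         fourth.append(" " + ans)
--       else:
--         fourth.append(" "*(max(len(firstOp[i]), len(secondOp[i])) - len(ans) + 2) + ans)
--
--     arranged_problems = '    '.join(first)+'\n' + '    '.join(second) + '\n' + '    '.join(third) + '\n' + '    '.join(fourth)
--   else:
--     arranged_problems = '    '.join(first)+'\n' + '    '.join(second) + '\n' + '    '.join(third)
--
--   return arranged_problems
-- ===== SOURCE B (Python) =====
-- def arithmetic_arranger(problems, solve=False):
--     if len(problems) > 5:
--         return 'Error: Too many problems.'
--     bad_op = bad_digit = bad_len = False
--     parsed = []
--     for p in problems: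
--         parts = p.split(' ')
--         a, op, b = parts[0], parts[1], parts[2]
--         bad_op = bad_op or (op != '+' and op != '-')
--         bad_digit = bad_digit or not (a.isdecimal() and b.isdecimal())
--         bad_len = bad_len or len(a) > 4 or len(b) > 4
--         parsed.append((a, op, b))
--     if bad_op:
--         return "Error: Operator must be '+' or '-'."
--     if bad_digit:
--         return 'Error: Numbers must only contain digits.'
--     if bad_len:
--         return 'Error: Numbers cannot be more than four digits.'
--     blocks = []
--     for a, op, b in parsed:
--         w = max(len(a), len(b)) + 2
--         block = [a.rjust(w), op + ' ' + b.rjust(w - 2), '-' * w]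
--         if solve:
--             r = str(int(a) + int(b) if op == '+' else int(a) - int(b))
--             block.append(' ' + r if len(r) + 2 > w else r.rjust(w))
--         blocks.append(block)
--     height = 4 if solve else 3
--     return '\n'.join('    '.join(block[k] for block in blocks) for k in range(height))
-- ===== Notes on version B (the rewrite author's own statement) =====
-- stated objective: simpler
-- what changed: B replaces A's ten staged loops by two: one validation-and-parse pass accumulating three categorical defect flags (priority operator > digits > length reproduces A's error choice because each category has a single message), and one formatting pass that renders each problem as its own vertical block of lines, transposed into rows at the end instead of A's four row-oriented index loops.
import Mathlib
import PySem

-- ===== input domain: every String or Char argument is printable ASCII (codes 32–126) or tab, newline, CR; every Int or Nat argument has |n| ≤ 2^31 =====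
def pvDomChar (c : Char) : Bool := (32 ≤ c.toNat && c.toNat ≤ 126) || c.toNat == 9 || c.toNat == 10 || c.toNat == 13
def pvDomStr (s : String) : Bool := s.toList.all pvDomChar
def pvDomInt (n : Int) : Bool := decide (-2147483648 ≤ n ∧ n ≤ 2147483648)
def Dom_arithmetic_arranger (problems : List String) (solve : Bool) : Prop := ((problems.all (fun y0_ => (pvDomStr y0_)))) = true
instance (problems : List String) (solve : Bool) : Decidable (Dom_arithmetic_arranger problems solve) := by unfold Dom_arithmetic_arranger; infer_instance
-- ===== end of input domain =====

-- B validates in ONE pass with three categorical flags (priority operator > digits > length, which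
-- reproduces A's five staged passes because each category has a single message) and formats each
-- problem as its own vertical block, transposing the blocks into rows at the end (objective: simpler).
-- Equivalence is about the RETURN value; neither version mutates its arguments.

-- ===== PORT A =====
def arithmetic_arranger (problems : List String) (solve : Bool) : String :=
  if problems.length > 5 then "Error: Too many problems." else
  -- the parse loop appends splitOp[0], splitOp[1], splitOp[2] to three lists; splitOp[i] raises
  -- IndexError when absent (excluded by Pre_), so .getD "" is exact inside Pre_
  let st := problems.foldl (fun (acc : List String × List String × List String) problem =>
      let splitOp := (PySem.Str.split? problem " ").getD []   -- sep " " ≠ "": split? is always some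
      (acc.1 ++ [(PySem.List.pyGet? splitOp 0).getD ""],
       acc.2.1 ++ [(PySem.List.pyGet? splitOp 1).getD ""],
       acc.2.2 ++ [(PySem.List.pyGet? splitOp 2).getD ""])) ([], [], [])
  let firstOp := st.1
  let operators := st.2.1
  let secondOp := st.2.2
  if operators.any (fun op => op != "+" && op != "-") then "Error: Operator must be '+' or '-'." else
  -- str.isdecimal agrees with str.isdigit on the printable-ASCII domain Dom_ guarantees
  if firstOp.any (fun number => !(PySem.Str.strIsdigit number)) then "Error: Numbers must only contain digits." else
  if secondOp.any (fun number => !(PySem.Str.strIsdigit number)) then "Error: Numbers must only contain digits." else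
  if firstOp.any (fun number => number.toList.length > 4) then "Error: Numbers cannot be more than four digits." else
  if secondOp.any (fun number => number.toList.length > 4) then "Error: Numbers cannot be more than four digits." else
  -- for i in range(len(firstOp)): list indexing is in range, so .getD "" is exact
  let first := (List.range firstOp.length).foldl (fun acc i =>
      let f := firstOp.getD i ""
      let s := secondOp.getD i ""
      if f.toList.length > s.toList.length then
        acc ++ [String.ofList (List.replicate 2 ' ') ++ f]
      else
        acc ++ [String.ofList (List.replicate (s.toList.length - f.toList.length + 2) ' ') ++ f]) []
  let second := (List.range secondOp.length).foldl (fun acc i =>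
      let f := firstOp.getD i ""
      let s := secondOp.getD i ""
      let op := operators.getD i ""
      if s.toList.length > f.toList.length then
        acc ++ [op ++ " " ++ s]
      else
        acc ++ [op ++ String.ofList (List.replicate (f.toList.length - s.toList.length + 1) ' ') ++ s]) []
  let third := (List.range firstOp.length).foldl (fun acc i =>
      let f := firstOp.getD i ""
      let s := secondOp.getD i ""
      acc ++ [String.ofList (List.replicate (max f.toList.length s.toList.length + 2) '-')]) []
  if solve then
    let fourth := (List.range firstOp.length).foldl (fun acc i =>
        let f := firstOp.getD i ""
        let s := secondOp.getD i ""
        let op := operators.getD i ""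
        -- int() on a validated decimal string never raises, so .getD 0 is exact
        let ans := if op == "+" then PySem.Int.toStr ((PySem.Int.ofStr? f).getD 0 + (PySem.Int.ofStr? s).getD 0)
                   else PySem.Int.toStr ((PySem.Int.ofStr? f).getD 0 - (PySem.Int.ofStr? s).getD 0)
        if ans.toList.length > max f.toList.length s.toList.length then
          acc ++ [" " ++ ans]
        else
          acc ++ [String.ofList (List.replicate (max f.toList.length s.toList.length - ans.toList.length + 2) ' ') ++ ans]) []
    PySem.Str.join "    " first ++ "\n" ++ PySem.Str.join "    " second ++ "\n" ++
      PySem.Str.join "    " third ++ "\n" ++ PySem.Str.join "    " fourth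
  else
    PySem.Str.join "    " first ++ "\n" ++ PySem.Str.join "    " second ++ "\n" ++
      PySem.Str.join "    " third

-- ===== PORT B =====
-- s.rjust(w): left-pad with spaces to width w
def pvRjust (s : String) (w : Nat) : String :=
  String.ofList (List.replicate (w - s.toList.length) ' ') ++ s

def arithmetic_arranger_alt (problems : List String) (solve : Bool) : String :=
  if problems.length > 5 then "Error: Too many problems." else
  -- one pass: parse and accumulate the three categorical defect flags
  -- ('a, op, b = parts[0], parts[1], parts[2]' raises when fewer than 3 parts — excluded by Pre_)
  let st := problems.foldl (fun (acc : Bool × Bool × Bool × List (String × String × String)) p =>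
      let sp := (PySem.Str.split? p " ").getD []
      let a := (PySem.List.pyGet? sp 0).getD ""
      let op := (PySem.List.pyGet? sp 1).getD ""
      let b := (PySem.List.pyGet? sp 2).getD ""
      (acc.1 || (op != "+" && op != "-"),
       acc.2.1 || !(PySem.Str.strIsdigit a && PySem.Str.strIsdigit b),
       acc.2.2.1 || decide (a.toList.length > 4) || decide (b.toList.length > 4),
       acc.2.2.2 ++ [(a, op, b)])) (false, false, false, [])
  if st.1 then "Error: Operator must be '+' or '-'." else
  if st.2.1 then "Error: Numbers must only contain digits." else
  if st.2.2.1 then "Error: Numbers cannot be more than four digits." else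
  -- each problem becomes its own vertical block of 3 (or 4) lines
  let blocks := st.2.2.2.map (fun t =>
      let a := t.1
      let op := t.2.1
      let b := t.2.2
      let w := max a.toList.length b.toList.length + 2
      let block := [pvRjust a w, op ++ " " ++ pvRjust b (w - 2), String.ofList (List.replicate w '-')]
      if solve then
        let r := PySem.Int.toStr (if op == "+" then (PySem.Int.ofStr? a).getD 0 + (PySem.Int.ofStr? b).getD 0
                                  else (PySem.Int.ofStr? a).getD 0 - (PySem.Int.ofStr? b).getD 0)
        block ++ [if r.toList.length + 2 > w then " " ++ r else pvRjust r w]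
      else block)
  -- transpose the blocks into rows and join
  let height := if solve then 4 else 3
  PySem.Str.join "\n" ((List.range height).map (fun k =>
    PySem.Str.join "    " (blocks.map (fun b => b.getD k ""))))

-- ===== PRECONDITION & SPEC =====
-- Pre_ excludes exactly the inputs where A raises: at most 5 problems of which some does not
-- split on ' ' into at least 3 parts (splitOp[1]/[2] raises IndexError; B's unpacking raises too).
def Pre_arithmetic_arranger (problems : List String) (solve : Bool) : Prop :=
  problems.length ≤ 5 → ∀ p ∈ problems, 3 ≤ ((PySem.Str.split? p " ").getD []).length
instance (problems : List String) (solve : Bool) : Decidable (Pre_arithmetic_arranger problems solve) := by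
  unfold Pre_arithmetic_arranger; infer_instance
def pvWitness_arithmetic_arranger : List String × Bool := (["3 + 855", "98 - 16"], true)

def Spec_arithmetic_arranger (problems : List String) (solve : Bool) (out : String) : Prop := out = arithmetic_arranger_alt problems solve
instance (problems : List String) (solve : Bool) (out : String) : Decidable (Spec_arithmetic_arranger problems solve out) := by unfold Spec_arithmetic_arranger; infer_instance

-- ===== CLAIM (what is proved, stated in full; the proofs are below) =====
def Claim_equal_arithmetic_arranger : Prop := ∀ (problems : List String) (solve : Bool), Dom_arithmetic_arranger problems solve → Pre_arithmetic_arranger problems solve → Spec_arithmetic_arranger problems solve (arithmetic_arranger problems solve)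

-- ===== LEMMAS AND PROOFS =====

-- the parsed triple of one problem string
def pvParse (p : String) : String × String × String :=
  let sp := (PySem.Str.split? p " ").getD []
  ((PySem.List.pyGet? sp 0).getD "", (PySem.List.pyGet? sp 1).getD "", (PySem.List.pyGet? sp 2).getD "")

-- A's parse loop builds the three projections of the parsed list
theorem pv_triFold (l : List String) (acc : List String × List String × List String) :
    l.foldl (fun (acc : List String × List String × List String) problem =>
      let splitOp := (PySem.Str.split? problem " ").getD []
      (acc.1 ++ [(PySem.List.pyGet? splitOp 0).getD ""],
       acc.2.1 ++ [(PySem.List.pyGet? splitOp 1).getD ""],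
       acc.2.2 ++ [(PySem.List.pyGet? splitOp 2).getD ""])) acc
    = (acc.1 ++ (l.map pvParse).map (·.1),
       acc.2.1 ++ (l.map pvParse).map (·.2.1),
       acc.2.2 ++ (l.map pvParse).map (·.2.2)) := by
  induction l generalizing acc with
  | nil => simp
  | cons p l ih => simp [ih, pvParse]

-- B's single validation pass: the three flags are `any`s over the parsed list
theorem pv_flagFold (l : List String) (acc : Bool × Bool × Bool × List (String × String × String)) :
    l.foldl (fun (acc : Bool × Bool × Bool × List (String × String × String)) p =>
      let sp := (PySem.Str.split? p " ").getD []
      let a := (PySem.List.pyGet? sp 0).getD ""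
      let op := (PySem.List.pyGet? sp 1).getD ""
      let b := (PySem.List.pyGet? sp 2).getD ""
      (acc.1 || (op != "+" && op != "-"),
       acc.2.1 || !(PySem.Str.strIsdigit a && PySem.Str.strIsdigit b),
       acc.2.2.1 || decide (a.toList.length > 4) || decide (b.toList.length > 4),
       acc.2.2.2 ++ [(a, op, b)])) acc
    = (acc.1 || (l.map pvParse).any (fun t => t.2.1 != "+" && t.2.1 != "-"),
       acc.2.1 || (l.map pvParse).any (fun t => !(PySem.Str.strIsdigit t.1 && PySem.Str.strIsdigit t.2.2)),
       acc.2.2.1 || (l.map pvParse).any (fun t => decide (t.1.toList.length > 4) || decide (t.2.2.toList.length > 4)),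
       acc.2.2.2 ++ l.map pvParse) := by
  induction l generalizing acc with
  | nil => simp
  | cons p l ih =>
    rw [List.foldl_cons, ih]
    simp [pvParse, Bool.or_assoc]

-- any of a disjunction splits
theorem pv_any_or {α : Type} (l : List α) (p q : α → Bool) :
    l.any (fun x => p x || q x) = (l.any p || l.any q) := by
  induction l with
  | nil => simp
  | cons x l ih =>
    simp only [List.any_cons, ih]
    cases p x <;> cases q x <;> cases l.any p <;> cases l.any q <;> rfl

-- hoist the append out of a two-branch loop body
theorem pv_ite_append {β : Type} (c : Prop) [Decidable c] (acc : List β) (a b : β) :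
    (if c then acc ++ [a] else acc ++ [b]) = acc ++ [if c then a else b] := by
  split <;> rfl

-- an index loop reading three same-length projection lists is a map over the parsed list
theorem pv_rangeMap (ps : List (String × String × String))
    (F : String → String → String → String) :
    (List.range ps.length).map (fun i =>
        F ((ps.map (·.1)).getD i "") ((ps.map (·.2.1)).getD i "") ((ps.map (·.2.2)).getD i ""))
    = ps.map (fun t => F t.1 t.2.1 t.2.2) := by
  apply List.ext_getElem
  · simp
  · intro i h1 h2
    simp only [List.getElem_map, List.getElem_range, List.getD_eq_getElem?_getD]
    simp at h1
    simp [List.getElem?_eq_getElem h1]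

theorem pv_join3 (x y z : String) :
    PySem.Str.join "\n" [x, y, z] = x ++ "\n" ++ y ++ "\n" ++ z := by
  apply String.toList_inj.mp
  simp [PySem.Str.join, PySem.Chars.join, List.intercalate, List.intersperse]

theorem pv_join4 (x y z w : String) :
    PySem.Str.join "\n" [x, y, z, w] = x ++ "\n" ++ y ++ "\n" ++ z ++ "\n" ++ w := by
  apply String.toList_inj.mp
  simp [PySem.Str.join, PySem.Chars.join, List.intercalate, List.intersperse]

-- elementwise: A's first-line padding is rjust to width max+2
theorem pv_line1 (f s : String) :
    (if f.toList.length > s.toList.length then String.ofList (List.replicate 2 ' ') ++ f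
     else String.ofList (List.replicate (s.toList.length - f.toList.length + 2) ' ') ++ f)
    = pvRjust f (max f.toList.length s.toList.length + 2) := by
  unfold pvRjust
  split <;> rename_i h
  · rw [show max f.toList.length s.toList.length + 2 - f.toList.length = 2 from by omega]
  · rw [show max f.toList.length s.toList.length + 2 - f.toList.length
        = s.toList.length - f.toList.length + 2 from by omega]

-- elementwise: A's second-line padding is op ++ " " ++ rjust to width max
theorem pv_line2 (f s op : String) :
    (if s.toList.length > f.toList.length then op ++ " " ++ s
     else op ++ String.ofList (List.replicate (f.toList.length - s.toList.length + 1) ' ') ++ s)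
    = op ++ " " ++ pvRjust s (max f.toList.length s.toList.length) := by
  unfold pvRjust
  split <;> rename_i h
  · rw [show max f.toList.length s.toList.length - s.toList.length = 0 from by omega]
    apply String.toList_inj.mp
    simp
  · rw [show max f.toList.length s.toList.length - s.toList.length
        = f.toList.length - s.toList.length from by omega]
    apply String.toList_inj.mp
    simp [List.replicate_succ]

-- elementwise: A's answer-line padding is the same branch with rjust in the else arm
theorem pv_line4 (f s ans : String) :
    (if ans.toList.length > max f.toList.length s.toList.length then " " ++ ans
     else String.ofList (List.replicate (max f.toList.length s.toList.length - ans.toList.length + 2) ' ') ++ ans)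
    = (if ans.toList.length > max f.toList.length s.toList.length then " " ++ ans
       else pvRjust ans (max f.toList.length s.toList.length + 2)) := by
  unfold pvRjust
  split
  · rfl
  · rw [show max f.toList.length s.toList.length + 2 - ans.toList.length
        = max f.toList.length s.toList.length - ans.toList.length + 2 from by omega]

-- elementwise: B's answer line (toStr of an if, compare against w = max+2) equals A's
theorem pv_line4b (f s op : String) :
    (if (PySem.Int.toStr (if (op == "+") = true then (PySem.Int.ofStr? f).getD 0 + (PySem.Int.ofStr? s).getD 0
          else (PySem.Int.ofStr? f).getD 0 - (PySem.Int.ofStr? s).getD 0)).toList.length + 2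
        > max f.toList.length s.toList.length + 2 then
       " " ++ PySem.Int.toStr (if (op == "+") = true then (PySem.Int.ofStr? f).getD 0 + (PySem.Int.ofStr? s).getD 0
          else (PySem.Int.ofStr? f).getD 0 - (PySem.Int.ofStr? s).getD 0)
     else pvRjust (PySem.Int.toStr (if (op == "+") = true then (PySem.Int.ofStr? f).getD 0 + (PySem.Int.ofStr? s).getD 0
          else (PySem.Int.ofStr? f).getD 0 - (PySem.Int.ofStr? s).getD 0)) (max f.toList.length s.toList.length + 2))
    = (if (if (op == "+") = true then
            PySem.Int.toStr ((PySem.Int.ofStr? f).getD 0 + (PySem.Int.ofStr? s).getD 0)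
          else PySem.Int.toStr ((PySem.Int.ofStr? f).getD 0 - (PySem.Int.ofStr? s).getD 0)).toList.length
          > max f.toList.length s.toList.length then
       " " ++ (if (op == "+") = true then
            PySem.Int.toStr ((PySem.Int.ofStr? f).getD 0 + (PySem.Int.ofStr? s).getD 0)
          else PySem.Int.toStr ((PySem.Int.ofStr? f).getD 0 - (PySem.Int.ofStr? s).getD 0))
     else pvRjust (if (op == "+") = true then
            PySem.Int.toStr ((PySem.Int.ofStr? f).getD 0 + (PySem.Int.ofStr? s).getD 0)
          else PySem.Int.toStr ((PySem.Int.ofStr? f).getD 0 - (PySem.Int.ofStr? s).getD 0))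
          (max f.toList.length s.toList.length + 2)) := by
  rw [← apply_ite PySem.Int.toStr]
  simp only [Nat.add_lt_add_iff_right]

-- the four row lists of A, each rewritten as a single map over the parsed list
theorem pv_listA1 (ps : List (String × String × String)) :
    List.foldl (fun acc i =>
      if ((List.map (fun x => x.1) ps).getD i "").toList.length >
          ((List.map (fun x => x.2.2) ps).getD i "").toList.length then
        acc ++ [String.ofList (List.replicate 2 ' ') ++ (List.map (fun x => x.1) ps).getD i ""]
      else
        acc ++ [String.ofList (List.replicate (((List.map (fun x => x.2.2) ps).getD i "").toList.length -
            ((List.map (fun x => x.1) ps).getD i "").toList.length + 2) ' ') ++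
          (List.map (fun x => x.1) ps).getD i ""])
      [] (List.range (List.map (fun x => x.1) ps).length)
    = List.map (fun t => pvRjust t.1 (max t.1.toList.length t.2.2.toList.length + 2)) ps := by
  simp only [pv_ite_append, PySem.List.foldl_append_singleton_eq_map, List.nil_append, List.length_map]
  exact (pv_rangeMap ps (fun f op s =>
    if f.toList.length > s.toList.length then String.ofList (List.replicate 2 ' ') ++ f
    else String.ofList (List.replicate (s.toList.length - f.toList.length + 2) ' ') ++ f)).trans
    (by simp only [pv_line1])

theorem pv_listA2 (ps : List (String × String × String)) :
    List.foldl (fun acc i =>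
      if ((List.map (fun x => x.2.2) ps).getD i "").toList.length >
          ((List.map (fun x => x.1) ps).getD i "").toList.length then
        acc ++ [(List.map (fun x => x.2.1) ps).getD i "" ++ " " ++ (List.map (fun x => x.2.2) ps).getD i ""]
      else
        acc ++ [(List.map (fun x => x.2.1) ps).getD i "" ++
          String.ofList (List.replicate (((List.map (fun x => x.1) ps).getD i "").toList.length -
            ((List.map (fun x => x.2.2) ps).getD i "").toList.length + 1) ' ') ++
          (List.map (fun x => x.2.2) ps).getD i ""])
      [] (List.range (List.map (fun x => x.2.2) ps).length)
    = List.map (fun t => t.2.1 ++ " " ++ pvRjust t.2.2 (max t.1.toList.length t.2.2.toList.length)) ps := by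
  simp only [pv_ite_append, PySem.List.foldl_append_singleton_eq_map, List.nil_append, List.length_map]
  exact (pv_rangeMap ps (fun f op s =>
    if s.toList.length > f.toList.length then op ++ " " ++ s
    else op ++ String.ofList (List.replicate (f.toList.length - s.toList.length + 1) ' ') ++ s)).trans
    (by simp only [pv_line2])

theorem pv_listA3 (ps : List (String × String × String)) :
    List.foldl (fun acc i =>
      acc ++ [String.ofList (List.replicate (max ((List.map (fun x => x.1) ps).getD i "").toList.length
        ((List.map (fun x => x.2.2) ps).getD i "").toList.length + 2) '-')])
      [] (List.range (List.map (fun x => x.1) ps).length)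
    = List.map (fun t => String.ofList (List.replicate (max t.1.toList.length t.2.2.toList.length + 2) '-')) ps := by
  simp only [PySem.List.foldl_append_singleton_eq_map, List.nil_append, List.length_map]
  exact pv_rangeMap ps (fun f op s => String.ofList (List.replicate (max f.toList.length s.toList.length + 2) '-'))

theorem pv_listA4 (ps : List (String × String × String)) :
    List.foldl (fun acc i =>
      if (if ((List.map (fun x => x.2.1) ps).getD i "" == "+") = true then
                PySem.Int.toStr ((PySem.Int.ofStr? ((List.map (fun x => x.1) ps).getD i "")).getD 0 +
                  (PySem.Int.ofStr? ((List.map (fun x => x.2.2) ps).getD i "")).getD 0)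
              else
                PySem.Int.toStr ((PySem.Int.ofStr? ((List.map (fun x => x.1) ps).getD i "")).getD 0 -
                  (PySem.Int.ofStr? ((List.map (fun x => x.2.2) ps).getD i "")).getD 0)).toList.length >
          max ((List.map (fun x => x.1) ps).getD i "").toList.length
            ((List.map (fun x => x.2.2) ps).getD i "").toList.length then
        acc ++ [" " ++ (if ((List.map (fun x => x.2.1) ps).getD i "" == "+") = true then
                PySem.Int.toStr ((PySem.Int.ofStr? ((List.map (fun x => x.1) ps).getD i "")).getD 0 +
                  (PySem.Int.ofStr? ((List.map (fun x => x.2.2) ps).getD i "")).getD 0)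
              else
                PySem.Int.toStr ((PySem.Int.ofStr? ((List.map (fun x => x.1) ps).getD i "")).getD 0 -
                  (PySem.Int.ofStr? ((List.map (fun x => x.2.2) ps).getD i "")).getD 0))]
      else
        acc ++ [String.ofList (List.replicate (max ((List.map (fun x => x.1) ps).getD i "").toList.length
            ((List.map (fun x => x.2.2) ps).getD i "").toList.length - (if ((List.map (fun x => x.2.1) ps).getD i "" == "+") = true then
                PySem.Int.toStr ((PySem.Int.ofStr? ((List.map (fun x => x.1) ps).getD i "")).getD 0 +
                  (PySem.Int.ofStr? ((List.map (fun x => x.2.2) ps).getD i "")).getD 0)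
              else
                PySem.Int.toStr ((PySem.Int.ofStr? ((List.map (fun x => x.1) ps).getD i "")).getD 0 -
                  (PySem.Int.ofStr? ((List.map (fun x => x.2.2) ps).getD i "")).getD 0)).toList.length + 2) ' ') ++ (if ((List.map (fun x => x.2.1) ps).getD i "" == "+") = true then
                PySem.Int.toStr ((PySem.Int.ofStr? ((List.map (fun x => x.1) ps).getD i "")).getD 0 +
                  (PySem.Int.ofStr? ((List.map (fun x => x.2.2) ps).getD i "")).getD 0)
              else
                PySem.Int.toStr ((PySem.Int.ofStr? ((List.map (fun x => x.1) ps).getD i "")).getD 0 -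
                  (PySem.Int.ofStr? ((List.map (fun x => x.2.2) ps).getD i "")).getD 0))])
      [] (List.range (List.map (fun x => x.1) ps).length)
    = List.map (fun t =>
        if (if (t.2.1 == "+") = true then
                PySem.Int.toStr ((PySem.Int.ofStr? t.1).getD 0 + (PySem.Int.ofStr? t.2.2).getD 0)
              else
                PySem.Int.toStr ((PySem.Int.ofStr? t.1).getD 0 - (PySem.Int.ofStr? t.2.2).getD 0)).toList.length > max t.1.toList.length t.2.2.toList.length then " " ++ (if (t.2.1 == "+") = true then
                PySem.Int.toStr ((PySem.Int.ofStr? t.1).getD 0 + (PySem.Int.ofStr? t.2.2).getD 0)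
              else
                PySem.Int.toStr ((PySem.Int.ofStr? t.1).getD 0 - (PySem.Int.ofStr? t.2.2).getD 0))
        else pvRjust (if (t.2.1 == "+") = true then
                PySem.Int.toStr ((PySem.Int.ofStr? t.1).getD 0 + (PySem.Int.ofStr? t.2.2).getD 0)
              else
                PySem.Int.toStr ((PySem.Int.ofStr? t.1).getD 0 - (PySem.Int.ofStr? t.2.2).getD 0)) (max t.1.toList.length t.2.2.toList.length + 2)) ps := by
  simp only [pv_ite_append, PySem.List.foldl_append_singleton_eq_map, List.nil_append, List.length_map]
  exact (pv_rangeMap ps (fun f op s =>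
    if (if (op == "+") = true then
          PySem.Int.toStr ((PySem.Int.ofStr? f).getD 0 + (PySem.Int.ofStr? s).getD 0)
        else
          PySem.Int.toStr ((PySem.Int.ofStr? f).getD 0 - (PySem.Int.ofStr? s).getD 0)).toList.length >
        max f.toList.length s.toList.length then
      " " ++ (if (op == "+") = true then
          PySem.Int.toStr ((PySem.Int.ofStr? f).getD 0 + (PySem.Int.ofStr? s).getD 0)
        else
          PySem.Int.toStr ((PySem.Int.ofStr? f).getD 0 - (PySem.Int.ofStr? s).getD 0))
    else
      String.ofList (List.replicate (max f.toList.length s.toList.length -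
        (if (op == "+") = true then
          PySem.Int.toStr ((PySem.Int.ofStr? f).getD 0 + (PySem.Int.ofStr? s).getD 0)
        else
          PySem.Int.toStr ((PySem.Int.ofStr? f).getD 0 - (PySem.Int.ofStr? s).getD 0)).toList.length + 2) ' ') ++
      (if (op == "+") = true then
          PySem.Int.toStr ((PySem.Int.ofStr? f).getD 0 + (PySem.Int.ofStr? s).getD 0)
        else
          PySem.Int.toStr ((PySem.Int.ofStr? f).getD 0 - (PySem.Int.ofStr? s).getD 0)))).trans
    (by simp only [pv_line4])

-- A's five-way error chain with the uniform messages equals B's three-way chain over merged flags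
theorem pv_iteChain (b1 b2 b3 b4 b5 : Bool) (e1 e2 e3 : String) (sA sB : String)
    (hbody : sA = sB) :
    (if b1 = true then e1 else if b2 = true then e2 else if b3 = true then e2
     else if b4 = true then e3 else if b5 = true then e3 else sA)
    = (if b1 = true then e1 else if (b2 || b3) = true then e2
       else if (b4 || b5) = true then e3 else sB) := by
  cases b1 <;> cases b2 <;> cases b3 <;> cases b4 <;> cases b5 <;> simp_all

-- ===== VERDICT (by name: the statement is the Claim_ definition above) =====
theorem arithmetic_arranger_spec : Claim_equal_arithmetic_arranger := by
  intro problems solve _hdom _hpre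
  unfold Spec_arithmetic_arranger arithmetic_arranger arithmetic_arranger_alt
  by_cases h5 : problems.length > 5
  · simp only [if_pos h5]
  · simp only [if_neg h5]
    rw [pv_triFold, pv_flagFold]
    simp only [List.nil_append, Bool.false_or]
    generalize problems.map pvParse = ps
    simp only [List.any_map, Function.comp_def, bne, Bool.not_and,
      pv_any_or]
    refine pv_iteChain _ _ _ _ _ _ _ _ _ _ ?_
    cases solve
    · -- height = 3
      show _ = PySem.Str.join "\n" ((List.range 3).map _)
      rw [show List.range 3 = [0,1,2] from rfl]
      simp only [List.map_cons, List.map_nil, Bool.false_eq_true, if_false, List.map_map,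
        Function.comp_def, List.getD_cons_zero, List.getD_cons_succ, Nat.add_sub_cancel]
      rw [pv_join3, pv_listA1, pv_listA2, pv_listA3]
    · -- height = 4
      show _ = PySem.Str.join "\n" ((List.range 4).map _)
      rw [show List.range 4 = [0,1,2,3] from rfl]
      simp only [List.map_cons, List.map_nil, if_true, List.map_map, Function.comp_def,
        List.getD_cons_zero, List.getD_cons_succ, List.cons_append, List.nil_append]
      rw [pv_join4, pv_listA1, pv_listA2, pv_listA3, pv_listA4]
      simp only [Nat.add_sub_cancel, pv_line4b]
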